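-- pv_equiv track=rewrite | github.com/MvandderSluis/Advent-of-Code | Dag 2 puzzel 1.py | find_invalid_ids_in_range
-- ===== SOURCE A (Python) =====
-- from typing import List, Tuple
--
-- def find_invalid_ids_in_range(L: int, R: int) -> List[int]:
--     """
--     Return all invalid IDs in [L, R].
--     Invalid ID = a decimal string of even length with first half == second half.
--     """
--     invalids = []
--
--     len_L = len(str(L))
--     len_R = len(str(R))
--
--     for full_len in range(len_L, len_R + 1):
--         if full_len % 2 != 0:
--             continue
--
--         half_len = full_len // 2
--         base = 10 ** half_len
--         factor = base + 1
--
--         t_min = 10 ** (half_len - 1)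
--         t_max = base - 1
--
--         t_lower_bound = (L + factor - 1) // factor
--         t_upper_bound = R // factor
--
--         t_start = max(t_min, t_lower_bound)
--         t_end = min(t_max, t_upper_bound)
--
--         if t_start > t_end:
--             continue
--
--         for t in range(t_start, t_end + 1):
--             x = t * factor
--             if L <= x <= R:
--                 invalids.append(x)
--
--     return invalids
-- ===== SOURCE B (Python) =====
-- from typing import List
--
-- def find_invalid_ids_in_range(L: int, R: int) -> List[int]:
--     """
--     Return all invalid IDs in [L, R].
--     Invalid ID = a decimal string of even length with first half == second half.
--
--     Every invalid ID is t * (10**len(str(t)) + 1) for a unique half t >= 1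
--     (its decimal form is str(t) written twice), and this value is strictly
--     increasing in t.  Like A, only IDs whose total digit count lies between
--     len(str(L)) and len(str(R)) are considered; a single ascending scan over
--     the halves t replaces A's per-length bound arithmetic.
--     """
--     lo = len(str(L))
--     hi = len(str(R))
--     invalids = []
--     t = 1
--     while 2 * len(str(t)) <= hi:
--         if 2 * len(str(t)) >= lo:
--             x = t * (10 ** len(str(t)) + 1)
--             if L <= x <= R:
--                 invalids.append(x)
--         t += 1
--     return invalids
-- ===== Notes on version B (the rewrite author's own statement) =====
-- stated objective: simpler
-- what changed: Replaces A's per-digit-length loop with tight floordiv/ceildiv bound arithmetic by one plain ascending scan over half-values t=1,2,..., keeping x = t*(10**len(str(t))+1) when its digit count lies in [len(str(L)), len(str(R))] and L <= x <= R.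
import Mathlib
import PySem

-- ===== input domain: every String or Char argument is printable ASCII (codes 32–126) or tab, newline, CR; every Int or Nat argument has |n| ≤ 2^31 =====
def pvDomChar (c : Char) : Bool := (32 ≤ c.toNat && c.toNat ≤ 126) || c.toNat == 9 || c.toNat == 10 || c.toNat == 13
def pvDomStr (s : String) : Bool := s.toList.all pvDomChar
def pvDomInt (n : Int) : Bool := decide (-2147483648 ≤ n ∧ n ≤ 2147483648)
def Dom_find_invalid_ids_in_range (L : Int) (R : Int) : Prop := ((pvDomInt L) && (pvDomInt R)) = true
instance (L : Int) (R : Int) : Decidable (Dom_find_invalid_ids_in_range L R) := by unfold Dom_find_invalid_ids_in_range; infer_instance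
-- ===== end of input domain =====

-- B replaces A's per-digit-length bound arithmetic by one plain ascending scan over half-values
-- t=1,2,… filtered by the same digit-count window (simpler); neither version mutates anything.

-- ===== PORT A =====
-- literal transliteration of A; the '**' exponents half_len and half_len-1 are ≥ 0 for every
-- iterated full_len (full_len is even and ≥ len(str(L)) ≥ 1, so half_len ≥ 1), hence '.toNat' is exact
def find_invalid_ids_in_range (L : Int) (R : Int) : List Int :=
  let len_L : Int := (PySem.Int.toChars L).length
  let len_R : Int := (PySem.Int.toChars R).length
  (PySem.List.pyRange len_L (len_R + 1) 1).foldl (fun invalids full_len =>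
    if PySem.Int.mod full_len 2 ≠ 0 then invalids
    else
      let half_len := PySem.Int.floordiv full_len 2
      let base : Int := 10 ^ half_len.toNat
      let factor := base + 1
      let t_min : Int := 10 ^ (half_len - 1).toNat
      let t_max := base - 1
      let t_lower_bound := PySem.Int.floordiv (L + factor - 1) factor
      let t_upper_bound := PySem.Int.floordiv R factor
      let t_start := max t_min t_lower_bound
      let t_end := min t_max t_upper_bound
      if t_start > t_end then invalids
      else
        (PySem.List.pyRange t_start (t_end + 1) 1).foldl (fun invalids t =>
          let x := t * factor
          if L ≤ x ∧ x ≤ R then invalids ++ [x] else invalids) invalids) []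

-- ===== PORT B =====
-- Source B's while loop; 'fuel' only makes the recursion total: the loop runs while
-- 2*len(str(t)) ≤ hi, so t stays below 10^hi and fuel = 10^hi + 1 is never exhausted
def pvAltLoop (L : Int) (R : Int) (lo : Int) (hi : Int) (fuel : Nat) (t : Int)
    (invalids : List Int) : List Int :=
  match fuel with
  | 0 => invalids
  | fuel + 1 =>
    if 2 * (((PySem.Int.toChars t).length : ℕ) : Int) ≤ hi then
      pvAltLoop L R lo hi fuel (t + 1)
        (if lo ≤ 2 * (((PySem.Int.toChars t).length : ℕ) : Int) then
          (let x := t * (10 ^ (PySem.Int.toChars t).length + 1)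
           if L ≤ x ∧ x ≤ R then invalids ++ [x] else invalids)
         else invalids)
    else invalids

def find_invalid_ids_in_range_alt (L : Int) (R : Int) : List Int :=
  pvAltLoop L R ((PySem.Int.toChars L).length : Int) ((PySem.Int.toChars R).length : Int)
    (10 ^ (PySem.Int.toChars R).length + 1) 1 []

-- ===== PRECONDITION & SPEC =====
def Spec_find_invalid_ids_in_range (L : Int) (R : Int) (out : List Int) : Prop :=
  out = find_invalid_ids_in_range_alt L R
instance (L : Int) (R : Int) (out : List Int) : Decidable (Spec_find_invalid_ids_in_range L R out) := by
  unfold Spec_find_invalid_ids_in_range; infer_instance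

-- ===== CLAIM (what is proved, stated in full; the proofs are below) =====
def Claim_equal_find_invalid_ids_in_range : Prop := ∀ (L : Int) (R : Int), Dom_find_invalid_ids_in_range L R → Spec_find_invalid_ids_in_range L R (find_invalid_ids_in_range L R)

-- ===== LEMMAS AND PROOFS =====

theorem pvToDigitsCore10_length : ∀ (f n : Nat) (ds : List Char), n < f →
    (Nat.toDigitsCore 10 f n ds).length = Nat.log 10 n + 1 + ds.length := by
  intro f
  induction f with
  | zero => intro n ds h; omega
  | succ f ih =>
    intro n ds h
    rw [Nat.toDigitsCore]
    by_cases h10 : n / 10 = 0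
    · simp only [h10]
      have : Nat.log 10 n = 0 := Nat.log_eq_zero_iff.mpr (Or.inl (by omega))
      simp [this]
      omega
    · simp only [h10, if_false]
      have hn10 : 10 ≤ n := by omega
      have hlt : n / 10 < f := by
        have := Nat.div_lt_self (by omega : 0 < n) (by omega : 1 < 10)
        omega
      rw [ih (n / 10) _ hlt]
      have h1 : Nat.log 10 (n / 10) = Nat.log 10 n - 1 := Nat.log_div_base 10 n
      have h2 : 0 < Nat.log 10 n := Nat.log_pos (by omega) hn10
      simp only [List.length_cons]
      omega

theorem pvToChars_length_of_nonneg {n : Int} (h : 0 ≤ n) :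
    (PySem.Int.toChars n).length = Nat.log 10 n.toNat + 1 := by
  rw [PySem.Int.toChars, if_neg (by omega), Nat.toDigits,
    pvToDigitsCore10_length _ _ _ (Nat.lt_succ_self _)]
  simp

def pvCand (t : Int) : Int := t * (10 ^ (Nat.log 10 t.toNat + 1) + 1)

theorem pvT_lb {t : Int} (h : 1 ≤ t) : (10:Int) ^ (Nat.log 10 t.toNat) ≤ t := by
  have h1 := Nat.pow_log_le_self 10 (x := t.toNat) (by omega)
  have h0 : ((t.toNat : Int)) = t := Int.toNat_of_nonneg (by omega)
  calc (10:Int) ^ (Nat.log 10 t.toNat) = ((10 ^ (Nat.log 10 t.toNat) : ℕ) : Int) := by push_cast; ring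
    _ ≤ (t.toNat : Int) := by exact_mod_cast h1
    _ = t := h0

theorem pvT_ub {t : Int} (h : 1 ≤ t) : t < (10:Int) ^ (Nat.log 10 t.toNat + 1) := by
  have h1 := Nat.lt_pow_succ_log_self (b := 10) (by omega) t.toNat
  have h0 : ((t.toNat : Int)) = t := Int.toNat_of_nonneg (by omega)
  calc t = (t.toNat : Int) := h0.symm
    _ < ((10 ^ (Nat.log 10 t.toNat + 1) : ℕ) : Int) := by exact_mod_cast h1
    _ = (10:Int) ^ (Nat.log 10 t.toNat + 1) := by push_cast; ring

theorem pvCand_lb {t : Int} (h : 1 ≤ t) :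
    (10 : Int) ^ (2 * (Nat.log 10 t.toNat + 1) - 1) < pvCand t := by
  have h1 := pvT_lb h
  set k := Nat.log 10 t.toNat with hk
  have he : (10:Int) ^ (2 * (k + 1) - 1) = 10 ^ k * 10 ^ (k+1) := by
    rw [← pow_add]; congr 1; omega
  have hp : (0:Int) < 10 ^ (k+1) + 1 := by positivity
  have hq : (0:Int) < 10 ^ k := by positivity
  rw [pvCand, he]
  nlinarith [mul_le_mul_of_nonneg_right h1 (le_of_lt hp)]

theorem pvCand_ub {t : Int} (h : 1 ≤ t) :
    pvCand t < (10 : Int) ^ (2 * (Nat.log 10 t.toNat + 1)) := by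
  have h2 := pvT_ub h
  set k := Nat.log 10 t.toNat with hk
  have he : (10:Int) ^ (2 * (k + 1)) = 10 ^ (k+1) * 10 ^ (k+1) := by
    rw [← pow_add]; congr 1; omega
  have hp : (0:Int) < 10 ^ (k+1) := by positivity
  rw [pvCand, he]
  nlinarith [mul_le_mul_of_nonneg_right (le_of_lt h2) (le_of_lt hp)]

theorem pvCand_mono {t u : Int} (h : 1 ≤ t) (htu : t < u) : pvCand t < pvCand u := by
  have hu : 1 ≤ u := by omega
  have hk : Nat.log 10 t.toNat ≤ Nat.log 10 u.toNat := Nat.log_mono_right (by omega)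
  rcases eq_or_lt_of_le hk with heq | hlt
  · rw [pvCand, pvCand, heq]
    have : (0:Int) < 10 ^ (Nat.log 10 u.toNat + 1) + 1 := by positivity
    exact mul_lt_mul_of_pos_right htu this
  · calc pvCand t < 10 ^ (2 * (Nat.log 10 t.toNat + 1)) := pvCand_ub h
      _ ≤ 10 ^ (2 * (Nat.log 10 u.toNat + 1) - 1) :=
        pow_le_pow_right₀ (by norm_num) (by omega)
      _ < pvCand u := pvCand_lb hu

theorem pvPyRange_nil {a b : Int} (h : b ≤ a) : PySem.List.pyRange a b 1 = [] := by
  have := PySem.List.length_pyRange_one (a := a) (b := b)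
  have h0 : (b - a).toNat = 0 := by omega
  rw [h0] at this
  exact List.length_eq_zero_iff.mp this

def pvContrib (L R fl : Int) : List Int :=
  if PySem.Int.mod fl 2 ≠ 0 then [] else
  let h := PySem.Int.floordiv fl 2
  let factor : Int := 10 ^ h.toNat + 1
  let t_start := max ((10:Int) ^ (h - 1).toNat) (PySem.Int.floordiv (L + factor - 1) factor)
  let t_end := min ((10:Int) ^ h.toNat - 1) (PySem.Int.floordiv R factor)
  ((PySem.List.pyRange t_start (t_end + 1) 1).filter
      (fun t => decide (L ≤ t * factor ∧ t * factor ≤ R))).map (fun t => t * factor)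

theorem pvA_eq_flatMap (L R : Int) :
    find_invalid_ids_in_range L R =
      (PySem.List.pyRange ((PySem.Int.toChars L).length : Int)
        (((PySem.Int.toChars R).length : Int) + 1) 1).flatMap (pvContrib L R) := by
  rw [find_invalid_ids_in_range]
  have heq : (fun (invalids : List Int) (full_len : Int) =>
    if PySem.Int.mod full_len 2 ≠ 0 then invalids
    else
      let half_len := PySem.Int.floordiv full_len 2
      let base : Int := 10 ^ half_len.toNat
      let factor := base + 1
      let t_min : Int := 10 ^ (half_len - 1).toNat
      let t_max := base - 1
      let t_lower_bound := PySem.Int.floordiv (L + factor - 1) factor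
      let t_upper_bound := PySem.Int.floordiv R factor
      let t_start := max t_min t_lower_bound
      let t_end := min t_max t_upper_bound
      if t_start > t_end then invalids
      else
        (PySem.List.pyRange t_start (t_end + 1) 1).foldl (fun invalids t =>
          let x := t * factor
          if L ≤ x ∧ x ≤ R then invalids ++ [x] else invalids) invalids)
      = (fun acc fl => acc ++ pvContrib L R fl) := by
    funext acc fl
    by_cases hodd : PySem.Int.mod fl 2 ≠ 0
    · rw [if_pos hodd, pvContrib, if_pos hodd, List.append_nil]
    · rw [pvContrib, if_neg hodd, if_neg hodd]
      dsimp only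
      set factor : Int := 10 ^ (PySem.Int.floordiv fl 2).toNat + 1 with hfac
      set t_start := max ((10:Int) ^ ((PySem.Int.floordiv fl 2) - 1).toNat)
        (PySem.Int.floordiv (L + factor - 1) factor) with hts
      set t_end := min ((10:Int) ^ (PySem.Int.floordiv fl 2).toNat - 1)
        (PySem.Int.floordiv R factor) with hte
      by_cases hgt : t_start > t_end
      · rw [if_pos hgt, pvPyRange_nil (by omega), List.filter_nil, List.map_nil, List.append_nil]
      · rw [if_neg hgt]
        have := PySem.List.foldl_append_if
          (fun t => decide (L ≤ t * factor ∧ t * factor ≤ R)) (fun t => t * factor)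
          (PySem.List.pyRange t_start (t_end + 1) 1) acc
        simp only [decide_eq_true_eq] at this
        exact this
  rw [heq, PySem.List.foldl_append_eq_flatMap, List.nil_append]

theorem pvMem_contrib {L R fl x : Int} :
    x ∈ pvContrib L R fl ↔
      PySem.Int.mod fl 2 = 0 ∧
      ∃ t : Int, 1 ≤ t ∧ (2 * (Nat.log 10 t.toNat + 1) : Int) = fl ∧
        x = pvCand t ∧ L ≤ x ∧ x ≤ R := by
  by_cases hodd : PySem.Int.mod fl 2 ≠ 0
  · rw [pvContrib, if_pos hodd]
    constructor
    · intro hx; exact absurd hx (List.not_mem_nil)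
    · rintro ⟨h0, -⟩; exact absurd h0 hodd
  · rw [not_not] at hodd
    rw [pvContrib, if_neg (not_not_intro hodd)]
    have hh : PySem.Int.floordiv fl 2 = fl / 2 := PySem.Int.floordiv_eq_ediv_of_pos (by norm_num)
    set h := PySem.Int.floordiv fl 2 with hhdef
    have hdvd : (2:Int) ∣ fl := (PySem.Int.mod_eq_zero_iff_dvd fl 2).mp hodd
    have hfl2 : fl = 2 * h := by omega
    have hexp : (h - 1).toNat = h.toNat - 1 := by omega
    have hfpos : (0:Int) < 10 ^ h.toNat + 1 := by positivity
    have hcastA : (((10:ℕ) ^ (h.toNat - 1) : ℕ) : Int) = (10:Int) ^ (h.toNat - 1) := by push_cast; ring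
    have hcastB : (((10:ℕ) ^ h.toNat : ℕ) : Int) = (10:Int) ^ h.toNat := by push_cast; ring
    simp only [List.mem_map, List.mem_filter, PySem.List.mem_pyRange_one, decide_eq_true_eq,
      max_le_iff, hexp]
    constructor
    · rintro ⟨t, ⟨⟨⟨htmin, htlo⟩, htup⟩, hP⟩, rfl⟩
      have hP' : L ≤ t * (10 ^ h.toNat + 1) ∧ t * (10 ^ h.toNat + 1) ≤ R := by
        constructor <;> [exact hP.1; exact hP.2]
      have ht1 : 1 ≤ t := by
        have : (1:Int) ≤ 10 ^ (h.toNat - 1) := one_le_pow₀ (by norm_num)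
        omega
      have htmax : t ≤ 10 ^ h.toNat - 1 := by
        have := htup; omega
      have hh1 : 1 ≤ h.toNat := by
        rcases Nat.eq_zero_or_pos h.toNat with h0 | h1
        · exfalso
          rw [h0] at htmin htmax
          norm_num at htmin htmax
          omega
        · exact h1
      have hhtn : ((h.toNat : Int)) = h := by
        rcases Int.lt_or_le h 0 with hlt | hge
        · exfalso; omega
        · exact Int.toNat_of_nonneg hge
      -- digit-length of t is h
      have hlog : Nat.log 10 t.toNat = h.toNat - 1 := by
        apply Nat.log_eq_of_pow_le_of_lt_pow
        · omega
        · have : h.toNat - 1 + 1 = h.toNat := by omega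
          rw [this]; omega
      refine ⟨hodd, t, ht1, ?_, ?_, hP'.1, hP'.2⟩
      · rw [hlog]; omega
      · rw [pvCand, hlog]
        have : h.toNat - 1 + 1 = h.toNat := by omega
        rw [this]
    · rintro ⟨-, t, ht1, hlen, rfl, hL, hR⟩
      set k := Nat.log 10 t.toNat with hk
      have hh1 : 1 ≤ h := by omega
      have hhtn : ((h.toNat : Int)) = h := Int.toNat_of_nonneg (by omega)
      have hhk : h.toNat = k + 1 := by omega
      have htlb : (10:Int) ^ k ≤ t := pvT_lb ht1
      have htub : t < (10:Int) ^ (k + 1) := pvT_ub ht1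
      have hcand : pvCand t = t * (10 ^ h.toNat + 1) := by rw [pvCand, hhk]
      refine ⟨t, ⟨⟨⟨?_, ?_⟩, ?_⟩, ?_⟩, hcand.symm⟩
      · rw [hhk]; simpa using htlb
      · -- ceil(L / factor) ≤ t
        have := (PySem.Int.floordiv_lt_iff_lt_mul
          (a := L + (10 ^ h.toNat + 1) - 1) (b := 10 ^ h.toNat + 1) (q := t + 1) hfpos).mpr
          (by rw [hcand] at hL; nlinarith)
        omega
      · -- t < t_end + 1
        have h1 : t ≤ 10 ^ h.toNat - 1 := by rw [hhk]; omega
        have h2 : t ≤ PySem.Int.floordiv R (10 ^ h.toNat + 1) :=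
          (PySem.Int.le_floordiv_iff_mul_le hfpos).mpr (by rw [hcand] at hR; linarith)
        omega
      · rw [hcand] at hL hR; exact ⟨hL, hR⟩

theorem pvContrib_bounds {L R fl x : Int} (hx : x ∈ pvContrib L R fl) :
    1 ≤ fl ∧ (10:Int) ^ (fl.toNat - 1) < x ∧ x < (10:Int) ^ fl.toNat := by
  obtain ⟨-, t, ht1, hlen, rfl, -, -⟩ := pvMem_contrib.mp hx
  set k := Nat.log 10 t.toNat with hk
  have hfl : fl = 2 * ((k : Int) + 1) := by omega
  have h1 : (1:Int) ≤ fl := by omega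
  have he1 : fl.toNat - 1 = 2 * (k + 1) - 1 := by omega
  have he2 : fl.toNat = 2 * (k + 1) := by omega
  exact ⟨h1, by rw [he1]; exact pvCand_lb ht1, by rw [he2]; exact pvCand_ub ht1⟩

theorem pvSorted_A (L R : Int) : (find_invalid_ids_in_range L R).Pairwise (· < ·) := by
  rw [pvA_eq_flatMap, List.pairwise_flatMap]
  constructor
  · intro fl _
    by_cases hodd : PySem.Int.mod fl 2 ≠ 0
    · rw [pvContrib, if_pos hodd]; exact List.Pairwise.nil
    · rw [pvContrib, if_neg hodd]
      dsimp only
      have hfpos : (0:Int) < 10 ^ (PySem.Int.floordiv fl 2).toNat + 1 := by positivity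
      exact List.pairwise_map.mpr
        ((List.Pairwise.filter _ (PySem.List.pairwise_lt_pyRange_one _ _)).imp
          (fun hab => mul_lt_mul_of_pos_right hab hfpos))
  · refine (PySem.List.pairwise_lt_pyRange_one _ _).imp ?_
    intro a b hab x hx y hy
    obtain ⟨ha1, -, hxu⟩ := pvContrib_bounds hx
    obtain ⟨hb1, hyl, -⟩ := pvContrib_bounds hy
    calc x < 10 ^ a.toNat := hxu
      _ ≤ 10 ^ (b.toNat - 1) := pow_le_pow_right₀ (by norm_num) (by omega)
      _ < y := hyl

theorem pvMem_A {L R x : Int} :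
    x ∈ find_invalid_ids_in_range L R ↔
      ∃ t : Int, 1 ≤ t ∧
        ((PySem.Int.toChars L).length : Int) ≤ 2 * ((Nat.log 10 t.toNat : Int) + 1) ∧
        2 * ((Nat.log 10 t.toNat : Int) + 1) ≤ ((PySem.Int.toChars R).length : Int) ∧
        x = pvCand t ∧ L ≤ x ∧ x ≤ R := by
  rw [pvA_eq_flatMap]
  simp only [List.mem_flatMap, PySem.List.mem_pyRange_one]
  constructor
  · rintro ⟨fl, ⟨hlo, hhi⟩, hx⟩
    obtain ⟨-, t, ht1, hlen, hxc, hL, hR⟩ := pvMem_contrib.mp hx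
    exact ⟨t, ht1, by omega, by omega, hxc, hL, hR⟩
  · rintro ⟨t, ht1, hlo, hhi, hxc, hL, hR⟩
    refine ⟨2 * ((Nat.log 10 t.toNat : Int) + 1), ⟨by omega, by omega⟩, ?_⟩
    refine pvMem_contrib.mpr ⟨?_, t, ht1, by omega, hxc, hL, hR⟩
    exact (PySem.Int.mod_eq_zero_iff_dvd _ _).mpr ⟨(Nat.log 10 t.toNat : Int) + 1, by ring⟩

theorem pvMem_altLoop (L R lo hi : Int) : ∀ (fuel : Nat) (t : Int) (acc : List Int) (x : Int),
    1 ≤ t → (10:Int) ^ hi.toNat < t + fuel →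
    (x ∈ pvAltLoop L R lo hi fuel t acc ↔
      x ∈ acc ∨ ∃ u : Int, t ≤ u ∧
        lo ≤ 2 * ((Nat.log 10 u.toNat : Int) + 1) ∧
        2 * ((Nat.log 10 u.toNat : Int) + 1) ≤ hi ∧
        x = pvCand u ∧ L ≤ x ∧ x ≤ R) := by
  intro fuel
  induction fuel with
  | zero =>
    intro t acc x ht hfuel
    rw [pvAltLoop]
    constructor
    · exact Or.inl
    · rintro (h | ⟨u, htu, -, hwhi, -, -, -⟩)
      · exact h
      · exfalso
        have hu1 : (1:Int) ≤ u := by omega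
        have hub := pvT_ub hu1
        have hle : Nat.log 10 u.toNat + 1 ≤ hi.toNat := by omega
        have hp : (10:Int) ^ (Nat.log 10 u.toNat + 1) ≤ 10 ^ hi.toNat :=
          pow_le_pow_right₀ (by norm_num) hle
        omega
  | succ fuel ih =>
    intro t acc x ht hfuel
    rw [pvAltLoop]
    have hlen := pvToChars_length_of_nonneg (n := t) (by omega)
    have hc : pvCand t = t * (10 ^ (PySem.Int.toChars t).length + 1) := by
      rw [pvCand, hlen]
    by_cases hcond : 2 * (((PySem.Int.toChars t).length : ℕ) : Int) ≤ hi
    · rw [if_pos hcond]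
      rw [ih (t + 1) _ x (by omega) (by omega)]
      rw [hlen] at hcond
      by_cases hwin : lo ≤ 2 * (((PySem.Int.toChars t).length : ℕ) : Int)
      · rw [if_pos hwin]
        rw [hlen] at hwin
        by_cases hLR : L ≤ t * (10 ^ (PySem.Int.toChars t).length + 1) ∧
            t * (10 ^ (PySem.Int.toChars t).length + 1) ≤ R
        · rw [if_pos hLR]
          obtain ⟨hL', hR'⟩ := hLR
          rw [← hc] at hL' hR'
          simp only [List.mem_append, List.mem_singleton]
          constructor
          · rintro ((h | h) | ⟨u, hu, h1, h2, hx, hL, hR⟩)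
            · exact Or.inl h
            · exact Or.inr ⟨t, le_refl t, by omega, by omega, by rw [h, hc],
                by rw [h, ← hc]; exact hL', by rw [h, ← hc]; exact hR'⟩
            · exact Or.inr ⟨u, by omega, h1, h2, hx, hL, hR⟩
          · rintro (h | ⟨u, hu, h1, h2, hx, hL, hR⟩)
            · exact Or.inl (Or.inl h)
            · rcases eq_or_lt_of_le hu with rfl | hlt
              · exact Or.inl (Or.inr (by rw [hx, hc]))
              · exact Or.inr ⟨u, by omega, h1, h2, hx, hL, hR⟩
        · rw [if_neg hLR]
          constructor
          · rintro (h | ⟨u, hu, h1, h2, hx, hL, hR⟩)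
            · exact Or.inl h
            · exact Or.inr ⟨u, by omega, h1, h2, hx, hL, hR⟩
          · rintro (h | ⟨u, hu, h1, h2, hx, hL, hR⟩)
            · exact Or.inl h
            · rcases eq_or_lt_of_le hu with rfl | hlt
              · exact absurd ⟨by rw [← hc, ← hx]; exact hL, by rw [← hc, ← hx]; exact hR⟩ hLR
              · exact Or.inr ⟨u, by omega, h1, h2, hx, hL, hR⟩
      · rw [if_neg hwin]
        rw [hlen] at hwin
        constructor
        · rintro (h | ⟨u, hu, h1, h2, hx, hL, hR⟩)
          · exact Or.inl h
          · exact Or.inr ⟨u, by omega, h1, h2, hx, hL, hR⟩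
        · rintro (h | ⟨u, hu, h1, h2, hx, hL, hR⟩)
          · exact Or.inl h
          · rcases eq_or_lt_of_le hu with rfl | hlt
            · exfalso; push_cast at hwin h1; omega
            · exact Or.inr ⟨u, by omega, h1, h2, hx, hL, hR⟩
    · rw [if_neg hcond]
      rw [hlen] at hcond
      constructor
      · exact Or.inl
      · rintro (h | ⟨u, htu, -, hwhi, -, -, -⟩)
        · exact h
        · exfalso
          have hmono : Nat.log 10 t.toNat ≤ Nat.log 10 u.toNat :=
            Nat.log_mono_right (by omega)
          push_cast at hcond hwhi
          omega

theorem pvMem_alt {L R x : Int} :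
    x ∈ find_invalid_ids_in_range_alt L R ↔
      ∃ t : Int, 1 ≤ t ∧
        ((PySem.Int.toChars L).length : Int) ≤ 2 * ((Nat.log 10 t.toNat : Int) + 1) ∧
        2 * ((Nat.log 10 t.toNat : Int) + 1) ≤ ((PySem.Int.toChars R).length : Int) ∧
        x = pvCand t ∧ L ≤ x ∧ x ≤ R := by
  rw [find_invalid_ids_in_range_alt,
    pvMem_altLoop L R _ _ _ 1 [] x (le_refl 1) (by simp only [Int.toNat_natCast]; push_cast; omega)]
  simp only [List.not_mem_nil, false_or]

theorem pvSorted_altLoop (L R lo hi : Int) : ∀ (fuel : Nat) (t : Int) (acc : List Int),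
    1 ≤ t → acc.Pairwise (· < ·) → (∀ y ∈ acc, y < pvCand t) →
    (pvAltLoop L R lo hi fuel t acc).Pairwise (· < ·) := by
  intro fuel
  induction fuel with
  | zero => intro t acc _ hacc _; rw [pvAltLoop]; exact hacc
  | succ fuel ih =>
    intro t acc ht hacc hlt
    rw [pvAltLoop]
    have hlen := pvToChars_length_of_nonneg (n := t) (by omega)
    have hc : pvCand t = t * (10 ^ (PySem.Int.toChars t).length + 1) := by
      rw [pvCand, hlen]
    by_cases hcond : 2 * (((PySem.Int.toChars t).length : ℕ) : Int) ≤ hi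
    · rw [if_pos hcond]
      have hmono := pvCand_mono ht (show t < t + 1 by omega)
      by_cases hwin : lo ≤ 2 * (((PySem.Int.toChars t).length : ℕ) : Int)
      · rw [if_pos hwin]
        by_cases hLR : L ≤ t * (10 ^ (PySem.Int.toChars t).length + 1) ∧
            t * (10 ^ (PySem.Int.toChars t).length + 1) ≤ R
        · rw [if_pos hLR]
          refine ih (t + 1) _ (by omega) ?_ ?_
          · rw [List.pairwise_append]
            refine ⟨hacc, List.pairwise_singleton _ _, ?_⟩
            intro y hy z hz
            rw [List.mem_singleton] at hz
            subst hz
            rw [← hc]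
            exact hlt y hy
          · intro y hy
            rcases List.mem_append.mp hy with h | h
            · exact lt_trans (hlt y h) hmono
            · rw [List.mem_singleton] at h
              subst h
              rw [← hc]
              exact hmono
        · rw [if_neg hLR]
          exact ih (t + 1) _ (by omega) hacc (fun y hy => lt_trans (hlt y hy) hmono)
      · rw [if_neg hwin]
        exact ih (t + 1) _ (by omega) hacc (fun y hy => lt_trans (hlt y hy) hmono)
    · rw [if_neg hcond]; exact hacc

theorem pvSorted_alt (L R : Int) : (find_invalid_ids_in_range_alt L R).Pairwise (· < ·) := by
  rw [find_invalid_ids_in_range_alt]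
  exact pvSorted_altLoop L R _ _ _ 1 [] (le_refl 1) List.Pairwise.nil (by simp)

-- ===== VERDICT (by name: the statement is the Claim_ definition above) =====
theorem find_invalid_ids_in_range_spec : Claim_equal_find_invalid_ids_in_range := by
  intro L R _
  have hA := pvSorted_A L R
  have hB := pvSorted_alt L R
  refine List.eq_of_perm_of_sorted (le := (· < ·)) (fun a b _ _ h1 h2 => absurd h2 (lt_asymm h1)) hA hB ?_
  rw [List.perm_ext_iff_of_nodup (hA.imp ne_of_lt) (hB.imp ne_of_lt)]
  intro a
  exact pvMem_A.trans pvMem_alt.symm
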